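-- pv_equiv track=rewrite | github.com/MrBrantCode/unitest_baseline | mut_generate/mist_train_taco/taco_14364/solution.py | make_array_strictly_increasing
-- ===== SOURCE A (Python) =====
-- def make_array_strictly_increasing(n, a):
--     # Helper function to generate prime numbers up to a certain limit
--     def SieveOfEratosthenes(limit):
--         prime = [True] * (limit + 1)
--         p = 2
--         while p * p <= limit:
--             if prime[p] == True:
--                 for i in range(p * p, limit + 1, p):
--                     prime[i] = False
--             p += 1
--         return prime
--
--     # Generate prime numbers up to a reasonable limit
--     prime = SieveOfEratosthenes(6000)
--
--     # Find the smallest prime number greater than 2n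
--     p = 0
--     i = n * 2 + 1
--     while True:
--         if prime[i] == True:
--             p = i
--             break
--         i += 1
--
--     # Initialize the list of operations
--     operations = ['2 ' + str(n) + ' 1', '1 ' + str(n) + ' ' + str(p)]
--     for i in range(n - 1):
--         operations.append('2 ' + str(i + 1) + ' ' + str(p - i))
--
--     # Return the number of operations and the list of operations
--     return n + 1, operations
-- ===== SOURCE B (Python) =====
-- def make_array_strictly_increasing(n, a):
--     # Per-number trial division instead of a sieve; recursive search for the
--     # first True entry instead of the while loop; operations via comprehension.
--     def is_composite(k):
--         d = 2
--         while d * d <= k: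
--             if k % d == 0:
--                 return True
--             d += 1
--         return False
--
--     prime = [not is_composite(k) for k in range(6001)]
--
--     def first_true(i):
--         return i if prime[i] else first_true(i + 1)
--
--     p = first_true(2 * n + 1)
--
--     head = ['2 ' + str(n) + ' 1', '1 ' + str(n) + ' ' + str(p)]
--     tail = ['2 ' + str(j) + ' ' + str(p - j + 1) for j in range(1, n)]
--     return n + 1, head + tail
-- ===== Notes on version B (the rewrite author's own statement) =====
-- stated objective: alternative
-- what changed: The Sieve of Eratosthenes is replaced by a per-number trial-division table built in a comprehension, the while-loop scan for the first prime after 2n becomes a recursive search, and the operations list is built as head + comprehension (index shifted) instead of an append loop.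
-- outside the precondition, e.g. on make_array_strictly_increasing(2994, []): A raises IndexError, B raises IndexError; on make_array_strictly_increasing(-3002, []): A raises IndexError, B raises IndexError
import Mathlib
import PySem

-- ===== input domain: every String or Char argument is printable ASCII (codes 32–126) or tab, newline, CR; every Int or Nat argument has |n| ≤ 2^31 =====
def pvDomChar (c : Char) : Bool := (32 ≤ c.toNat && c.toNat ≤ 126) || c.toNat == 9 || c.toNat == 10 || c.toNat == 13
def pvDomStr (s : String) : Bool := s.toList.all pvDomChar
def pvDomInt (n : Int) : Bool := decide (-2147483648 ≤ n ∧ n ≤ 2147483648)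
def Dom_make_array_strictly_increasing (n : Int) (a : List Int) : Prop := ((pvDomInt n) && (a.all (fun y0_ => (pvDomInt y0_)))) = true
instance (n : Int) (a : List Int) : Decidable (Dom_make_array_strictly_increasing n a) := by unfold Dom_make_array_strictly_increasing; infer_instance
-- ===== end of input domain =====

-- B replaces A's Sieve of Eratosthenes by a trial-division table, the while-loop
-- prime scan by a recursive search, and the append loop by a comprehension.

-- ===== PORT A =====
-- inner 'for i in range(p*p, limit+1, p): prime[i] = False'; every index is nonnegative
-- and in range, so List.set on the toNat index is exact
def pvMarkA (prime : List Bool) (p : Int) : List Bool :=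
  (PySem.List.pyRange (p * p) 6001 p).foldl (fun pr i => pr.set i.toNat false) prime

-- 'while p*p <= limit' loop of SieveOfEratosthenes (limit = 6000); the Nat argument is
-- only a totality guard, always sufficient (p runs from 2 to at most 78)
def pvSieveA (prime : List Bool) (p : Int) : Nat → List Bool
  | 0 => prime
  | fuel + 1 =>
    if p * p ≤ 6000 then
      pvSieveA (if PySem.List.pyGet? prime p = some true then pvMarkA prime p else prime) (p + 1) fuel
    else prime

-- the 'while True' scan; none = Python's IndexError (the fuel is only a totality guard,
-- always sufficient: the scan either returns or runs off the end of the table)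
def pvScanA (prime : List Bool) (i : Int) : Nat → Option Int
  | 0 => none
  | fuel + 1 =>
    match PySem.List.pyGet? prime i with
    | none => none
    | some b => if b = true then some i else pvScanA prime (i + 1) fuel

def make_array_strictly_increasing (n : Int) (a : List Int) : Int × List String :=
  let prime := pvSieveA (List.replicate 6001 true) 2 100
  let i0 := n * 2 + 1
  match pvScanA prime i0 ((6002 - i0).toNat + 1) with
  | none => (0, [])   -- Python raises IndexError here; excluded by Pre_
  | some p =>
    let operations := ["2 " ++ PySem.Int.toStr n ++ " 1",
                       "1 " ++ PySem.Int.toStr n ++ " " ++ PySem.Int.toStr p]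
    let operations := (PySem.List.pyRange 0 (n - 1) 1).foldl
      (fun ops i => ops ++ ["2 " ++ PySem.Int.toStr (i + 1) ++ " " ++ PySem.Int.toStr (p - i)]) operations
    (n + 1, operations)

-- ===== PORT B =====
-- 'while d*d <= k' trial-division loop of is_composite; the Nat argument is only a
-- totality guard, always sufficient on the table's k ≤ 6000 (d runs from 2 to at most 78)
def pvIsComposite (k : Int) (d : Int) : Nat → Bool
  | 0 => false
  | fuel + 1 =>
    if d * d ≤ k then
      if PySem.Int.mod k d = 0 then true else pvIsComposite k (d + 1) fuel
    else false

-- recursive 'first_true'; none = Python's IndexError at prime[i] (fuel is only a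
-- totality guard, always sufficient: the search returns or leaves the table)
def pvFirstTrue (prime : List Bool) (i : Int) : Nat → Option Int
  | 0 => none
  | fuel + 1 =>
    match PySem.List.pyGet? prime i with
    | some true => some i
    | some false => pvFirstTrue prime (i + 1) fuel
    | none => none

def make_array_strictly_increasing_alt (n : Int) (a : List Int) : Int × List String :=
  let prime := (PySem.List.pyRange 0 6001 1).map (fun k => !pvIsComposite k 2 100)
  match pvFirstTrue prime (2 * n + 1) ((6002 - (2 * n + 1)).toNat + 1) with
  | none => (0, [])   -- Python raises IndexError here; excluded by Pre_
  | some p =>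
    let head := ["2 " ++ PySem.Int.toStr n ++ " 1",
                 "1 " ++ PySem.Int.toStr n ++ " " ++ PySem.Int.toStr p]
    let tail := (PySem.List.pyRange 1 n 1).map
      (fun j => "2 " ++ PySem.Int.toStr j ++ " " ++ PySem.Int.toStr (p - j + 1))
    (n + 1, head ++ tail)

-- ===== PRECONDITION & SPEC =====
-- Pre_ excludes exactly the n on which A raises IndexError: the scan from 2n+1 runs off
-- the length-6001 table (for n ≥ 2994 no True entry remains at index ≤ 6000; for
-- n ≤ -3002 the first negative index 2n+1 is already out of range).
def Pre_make_array_strictly_increasing (n : Int) (a : List Int) : Prop := -3001 ≤ n ∧ n ≤ 2993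
instance (n : Int) (a : List Int) : Decidable (Pre_make_array_strictly_increasing n a) := by unfold Pre_make_array_strictly_increasing; infer_instance
def pvWitness_make_array_strictly_increasing : Int × List Int := (5, [])

def Spec_make_array_strictly_increasing (n : Int) (a : List Int) (out : Int × List String) : Prop := out = make_array_strictly_increasing_alt n a
instance (n : Int) (a : List Int) (out : Int × List String) : Decidable (Spec_make_array_strictly_increasing n a out) := by unfold Spec_make_array_strictly_increasing; infer_instance

-- ===== CLAIM (what is proved, stated in full; the proofs are below) =====
def Claim_equal_make_array_strictly_increasing : Prop := ∀ (n : Int) (a : List Int), Dom_make_array_strictly_increasing n a → Pre_make_array_strictly_increasing n a → Spec_make_array_strictly_increasing n a (make_array_strictly_increasing n a)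

-- ===== LEMMAS AND PROOFS =====

-- membership in a positive-step range
theorem pvMem_pyRange_pos {a b p x : Int} (hp : 0 < p) :
    x ∈ PySem.List.pyRange a b p ↔ a ≤ x ∧ x < b ∧ p ∣ (x - a) := by
  have hp0 : ¬ p = 0 := by omega
  unfold PySem.List.pyRange
  simp only [if_neg hp0, if_pos hp, List.mem_map, List.mem_range]
  by_cases hab : a < b
  · simp only [if_pos hab]
    constructor
    · rintro ⟨k, hk, rfl⟩
      have hk' : (k : Int) < (b - a + p - 1) / p := Int.lt_toNat.mp hk
      have hk2 : ((k : Int) + 1) * p ≤ b - a + p - 1 := (Int.le_ediv_iff_mul_le hp).mp (by omega)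
      have hkk : 0 ≤ p * (k : Int) := mul_nonneg (by omega) (by positivity)
      refine ⟨by omega, by nlinarith, ⟨(k : Int), by ring⟩⟩
    · rintro ⟨h1, h2, k, hk⟩
      have hk0 : 0 ≤ k := by nlinarith
      refine ⟨k.toNat, ?_, by rw [Int.toNat_of_nonneg hk0]; omega⟩
      rw [Int.lt_toNat, Int.toNat_of_nonneg hk0]
      have h3 : (k + 1) * p ≤ b - a + p - 1 := by nlinarith
      have := (Int.le_ediv_iff_mul_le hp).mpr h3
      omega
  · rw [if_neg hab]
    constructor
    · rintro ⟨k, hk, -⟩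
      omega
    · rintro ⟨h1, h2, -⟩
      exact absurd (h1.trans_lt h2) hab

-- effect of the fold of in-range assignments on getElem?
theorem pvFoldlSet_spec (idxs : List Int) (st : List Bool)
    (hnn : ∀ i ∈ idxs, 0 ≤ i) (hlt : ∀ i ∈ idxs, i < st.length) :
    (idxs.foldl (fun pr i => pr.set i.toNat false) st).length = st.length ∧
    ∀ j : Nat, (idxs.foldl (fun pr i => pr.set i.toNat false) st)[j]? =
      if (j : Int) ∈ idxs then some false else st[j]? := by
  induction idxs generalizing st with
  | nil => simp
  | cons i rest ih =>
    have hi0 : 0 ≤ i := hnn i (by simp)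
    have hilt : i < st.length := hlt i (by simp)
    have hlen : (st.set i.toNat false).length = st.length := by simp
    obtain ⟨ihlen, ihget⟩ := ih (st.set i.toNat false)
      (fun x hx => hnn x (by simp [hx])) (fun x hx => by rw [hlen]; exact hlt x (by simp [hx]))
    constructor
    · simpa [hlen] using ihlen
    · intro j
      simp only [List.foldl_cons]
      rw [ihget j]
      by_cases hj : (j : Int) ∈ rest
      · rw [if_pos hj, if_pos (by simp [hj])]
      · rw [if_neg hj]
        by_cases hij : i = (j : Int)
        · rw [if_pos (by simp [hij]), List.getElem?_set,
              if_pos (show i.toNat = j by omega), if_pos (show i.toNat < st.length by omega)]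
        · rw [if_neg (by simp [hj]; omega), List.getElem?_set,
              if_neg (show ¬ i.toNat = j by omega)]

-- effect of one marking pass
theorem pvMarkA_spec (st : List Bool) (p : Int) (hp : 2 ≤ p) (hlen : st.length = 6001) :
    (pvMarkA st p).length = 6001 ∧
    ∀ j : Nat, (pvMarkA st p)[j]? =
      if p * p ≤ (j : Int) ∧ (j : Int) < 6001 ∧ p ∣ (j : Int) then some false else st[j]? := by
  have hp0 : (0 : Int) < p := by omega
  have hmem : ∀ x : Int, x ∈ PySem.List.pyRange (p * p) 6001 p ↔
      p * p ≤ x ∧ x < 6001 ∧ p ∣ x := by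
    intro x
    rw [pvMem_pyRange_pos hp0]
    have hpp : p ∣ p * p := dvd_mul_left p p
    constructor
    · rintro ⟨h1, h2, hd⟩
      refine ⟨h1, h2, ?_⟩
      have := dvd_add hd hpp
      simpa using this
    · rintro ⟨h1, h2, hd⟩
      exact ⟨h1, h2, dvd_sub hd hpp⟩
  obtain ⟨l, g⟩ := pvFoldlSet_spec (PySem.List.pyRange (p * p) 6001 p) st
    (fun i hi => by have := ((hmem i).mp hi).1; nlinarith)
    (fun i hi => by have := (hmem i).mp hi; omega)
  refine ⟨by rw [pvMarkA, l, hlen], fun j => ?_⟩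
  rw [pvMarkA, g j]
  by_cases hcond : p * p ≤ (j : Int) ∧ (j : Int) < 6001 ∧ p ∣ (j : Int)
  · rw [if_pos ((hmem _).mpr hcond), if_pos hcond]
  · rw [if_neg (fun h => hcond ((hmem _).mp h)), if_neg hcond]

-- the "no witnessed divisor below P" predicate that the sieve state tracks
def pvGoodB (P j : Int) : Prop := ∀ d : Int, 2 ≤ d → d < P → d * d ≤ j → ¬ d ∣ j

-- sieve-loop invariant: entry j is True iff j has no divisor d with 2 ≤ d < p, d² ≤ j
def pvInv (st : List Bool) (p : Int) : Prop :=
  st.length = 6001 ∧ ∀ j : Nat, j < 6001 → (st[j]? = some true ↔ pvGoodB p (j : Int))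

theorem pvStep (st : List Bool) (p : Int) (hp : 2 ≤ p) (hp77 : p ≤ 77) (hinv : pvInv st p) :
    pvInv (if PySem.List.pyGet? st p = some true then pvMarkA st p else st) (p + 1) := by
  obtain ⟨hlen, hget⟩ := hinv
  have hplt : p < (st.length : Int) := by rw [hlen]; omega
  have hlook : PySem.List.pyGet? st p = st[p.toNat]? := by
    rw [PySem.List.pyGet?_eq_some_getElem st (by omega) hplt,
        List.getElem?_eq_getElem (by omega)]
  have hptn : ((p.toNat : Nat) : Int) = p := Int.toNat_of_nonneg (by omega)
  by_cases hc : PySem.List.pyGet? st p = some true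
  · -- table entry p is True: p has no divisor d with 2 ≤ d < p and d² ≤ p
    have hgood : pvGoodB p p := by
      have := (hget p.toNat (by omega)).mp (by rw [← hlook]; exact hc)
      rwa [hptn] at this
    obtain ⟨ml, mg⟩ := pvMarkA_spec st p hp hlen
    rw [if_pos hc]
    refine ⟨ml, fun j hj => ?_⟩
    rw [mg j]
    by_cases hmark : p * p ≤ (j : Int) ∧ (j : Int) < 6001 ∧ p ∣ (j : Int)
    · rw [if_pos hmark]
      constructor
      · intro h; exact Bool.noConfusion (Option.some.inj h)
      · intro hG; exact absurd hmark.2.2 (hG p hp (by omega) hmark.1)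
    · rw [if_neg hmark]
      rw [hget j hj]
      constructor
      · intro hG d hd2 hdp hdd hdj
        rcases lt_or_eq_of_le (show d ≤ p by omega) with h | h
        · exact hG d hd2 h hdd hdj
        · subst h
          exact hmark ⟨hdd, by omega, hdj⟩
      · intro hG d hd2 hdp hdd hdj
        exact hG d hd2 (by omega) hdd hdj
  · -- table entry p is False: p has a smaller divisor q, which already covers
    -- every multiple of p in the predicate
    have hbad : ¬ pvGoodB p p := fun h =>
      hc (hlook.trans ((hget p.toNat (by omega)).mpr (by rw [hptn]; exact h)))
    have hex : ∃ q : Int, 2 ≤ q ∧ q < p ∧ q * q ≤ p ∧ q ∣ p := by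
      by_contra hno
      exact hbad (fun d h1 h2 h3 h4 => hno ⟨d, h1, h2, h3, h4⟩)
    obtain ⟨q, hq2, hqp, hqq, hqd⟩ := hex
    rw [if_neg hc]
    refine ⟨hlen, fun j hj => ?_⟩
    rw [hget j hj]
    constructor
    · intro hG d hd2 hdp hdd hdj
      rcases lt_or_eq_of_le (show d ≤ p by omega) with h | h
      · exact hG d hd2 h hdd hdj
      · subst h
        have hqj : q ∣ (j : Int) := hqd.trans hdj
        have hqqj : q * q ≤ (j : Int) := by nlinarith
        exact hG q hq2 (by omega) hqqj hqj
    · intro hG d hd2 hdp hdd hdj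
      exact hG d hd2 (by omega) hdd hdj

theorem pvLoop (fuel : Nat) : ∀ (st : List Bool) (p : Int), 2 ≤ p → p ≤ 78 →
    78 ≤ p + fuel → pvInv st p → pvInv (pvSieveA st p fuel) 78 := by
  induction fuel with
  | zero =>
    intro st p hp hple hf hinv
    have : p = 78 := by omega
    subst this
    exact hinv
  | succ f ih =>
    intro st p hp hple hf hinv
    rw [pvSieveA]
    by_cases hcond : p * p ≤ 6000
    · have hp77 : p ≤ 77 := by nlinarith
      rw [if_pos hcond]
      exact ih _ (p + 1) (by omega) (by omega) (by omega) (pvStep st p hp hp77 hinv)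
    · have h78 : 78 ≤ p := by nlinarith
      have : p = 78 := by omega
      subst this
      rw [if_neg hcond]
      exact hinv

-- the trial-division loop is false exactly when no divisor e ≥ d with e² ≤ k exists
theorem pvIsComposite_spec (fuel : Nat) : ∀ (k d : Int), 2 ≤ d → k ≤ 6000 → 78 ≤ d + fuel →
    (pvIsComposite k d fuel = false ↔ ∀ e : Int, d ≤ e → e * e ≤ k → ¬ e ∣ k) := by
  induction fuel with
  | zero =>
    intro k d hd hk hf
    rw [pvIsComposite]
    simp only [true_iff]
    intro e he hee _
    have h78 : (78 : Int) ≤ d := by omega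
    have h1 : (78 : Int) * 78 ≤ d * d := mul_le_mul h78 h78 (by omega) (by omega)
    have h2 : d * d ≤ e * e := mul_le_mul he he (by omega) (by omega)
    linarith
  | succ f ih =>
    intro k d hd hk hf
    rw [pvIsComposite]
    by_cases hdd : d * d ≤ k
    · rw [if_pos hdd]
      by_cases hmod : PySem.Int.mod k d = 0
      · rw [if_pos hmod]
        constructor
        · intro h; exact Bool.noConfusion h
        · intro h
          exact absurd ((PySem.Int.mod_eq_zero_iff_dvd k d).mp hmod) (h d le_rfl hdd)
      · rw [if_neg hmod, ih k (d + 1) (by omega) hk (by omega)]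
        have hndvd : ¬ d ∣ k := fun h => hmod ((PySem.Int.mod_eq_zero_iff_dvd k d).mpr h)
        constructor
        · intro h e he hee hdj
          rcases lt_or_eq_of_le he with h1 | h1
          · exact h e (by omega) hee hdj
          · exact hndvd (h1 ▸ hdj)
        · intro h e he hee hdj
          exact h e (by omega) hee hdj
    · rw [if_neg hdd]
      simp only [true_iff]
      intro e he hee _
      have h2 : d * d ≤ e * e := mul_le_mul he he (by omega) (by omega)
      linarith

-- bridge: for j ≤ 6000 the bounded and unbounded "no divisor" conditions agree
theorem pvGoodB_iff (j : Int) (hj : j ≤ 6000) :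
    pvGoodB 78 j ↔ ∀ e : Int, 2 ≤ e → e * e ≤ j → ¬ e ∣ j := by
  constructor
  · intro h e he hee hdj
    have : e ≤ 77 := by nlinarith
    exact h e he (by omega) hee hdj
  · intro h e he _ hee hdj
    exact h e he hee hdj

-- the two tables coincide
theorem pvTableEq : pvSieveA (List.replicate 6001 true) 2 100
    = (PySem.List.pyRange 0 6001 1).map (fun k => !pvIsComposite k 2 100) := by
  have hinit : pvInv (List.replicate 6001 true) 2 := by
    refine ⟨List.length_replicate, fun j hj => ?_⟩
    rw [List.getElem?_replicate, if_pos hj]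
    constructor
    · intro _ d hd2 hd hdd hdj; omega
    · intro _; rfl
  obtain ⟨halen, haget⟩ := pvLoop 100 (List.replicate 6001 true) 2 (by omega) (by omega) (by omega) hinit
  have hbget : ∀ j : Nat, j < 6001 →
      ((PySem.List.pyRange 0 6001 1).map (fun k => !pvIsComposite k 2 100))[j]? =
        some (!pvIsComposite (j : Int) 2 100) := by
    intro j hj
    rw [List.getElem?_map,
        List.getElem?_eq_getElem (show j < (PySem.List.pyRange 0 6001 1).length by
          rw [PySem.List.length_pyRange_one]; omega),
        PySem.List.getElem_pyRange_one]
    simp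
  apply List.ext_getElem?
  intro j
  by_cases hj : j < 6001
  · rw [hbget j hj]
    have haiff := haget j hj
    obtain ⟨x, hx⟩ : ∃ x, (pvSieveA (List.replicate 6001 true) 2 100)[j]? = some x :=
      ⟨_, List.getElem?_eq_getElem (show j < (pvSieveA (List.replicate 6001 true) 2 100).length by omega)⟩
    rw [hx] at haiff ⊢
    have hbiff : pvIsComposite (j : Int) 2 100 = false ↔ pvGoodB 78 (j : Int) := by
      rw [pvIsComposite_spec 100 (j : Int) 2 (by omega) (by omega) (by omega),
          pvGoodB_iff (j : Int) (by omega)]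
    cases x with
    | true =>
      have hg : pvGoodB 78 (j : Int) := haiff.mp rfl
      simp [hbiff.mpr hg]
    | false =>
      cases hcb : pvIsComposite (j : Int) 2 100 with
      | true => rfl
      | false =>
        have hg : pvGoodB 78 (j : Int) := hbiff.mp hcb
        exact Bool.noConfusion (Option.some.inj (haiff.mpr hg))
  · rw [List.getElem?_eq_none (by omega),
        List.getElem?_eq_none (by rw [List.length_map, PySem.List.length_pyRange_one]; omega)]

-- A's while-loop scan and B's recursive search are the same function of the table
theorem pvScanEq (fuel : Nat) : ∀ (prime : List Bool) (i : Int), pvScanA prime i fuel = pvFirstTrue prime i fuel := by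
  induction fuel with
  | zero => intro prime i; rfl
  | succ f ih =>
    intro prime i
    rw [pvScanA, pvFirstTrue]
    cases PySem.List.pyGet? prime i with
    | none => rfl
    | some b => cases b <;> simp [ih]

-- A's append loop over range(n-1) builds exactly B's comprehension over range(1, n)
theorem pvOpsEq (n p : Int) (ops : List String) :
    (PySem.List.pyRange 0 (n - 1) 1).foldl
      (fun acc i => acc ++ ["2 " ++ PySem.Int.toStr (i + 1) ++ " " ++ PySem.Int.toStr (p - i)]) ops
    = ops ++ (PySem.List.pyRange 1 n 1).map
        (fun j => "2 " ++ PySem.Int.toStr j ++ " " ++ PySem.Int.toStr (p - j + 1)) := by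
  rw [PySem.List.foldl_append_singleton_eq_map]
  congr 1
  rw [PySem.List.pyRange_one, PySem.List.pyRange_one]
  have hlen : (n - 1 - 0).toNat = (n - 1).toNat := by omega
  rw [hlen, List.map_map, List.map_map]
  apply List.map_congr_left
  intro k _
  simp only [Function.comp]
  have h1 : (0 : Int) + (k : Int) + 1 = 1 + (k : Int) := by ring
  have h2 : p - (0 + (k : Int)) = p - (1 + (k : Int)) + 1 := by ring
  rw [h1, h2]

-- ===== VERDICT (by name: the statement is the Claim_ definition above) =====
theorem make_array_strictly_increasing_spec : Claim_equal_make_array_strictly_increasing := by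
  intro n a _ _
  unfold Spec_make_array_strictly_increasing
  unfold make_array_strictly_increasing make_array_strictly_increasing_alt
  have hn : n * 2 + 1 = 2 * n + 1 := by ring
  simp only [pvTableEq, pvScanEq, hn]
  cases pvFirstTrue ((PySem.List.pyRange 0 6001 1).map (fun k => !pvIsComposite k 2 100))
      (2 * n + 1) ((6002 - (2 * n + 1)).toNat + 1) with
  | none => rfl
  | some p =>
    simp only [pvOpsEq]
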